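-- pv_equiv track=rewrite | github.com/joamdlim/addu-admissions-chatbot | backend/chatbot/fast_hybrid_chatbot_together.py | _extract_school_info
-- ===== SOURCE A (Python) =====
-- def _extract_school_info(content: str, query: str) -> str:
--     """Extract school-specific information"""
--     lines = content.split('\n')
--     result = []
--     in_target_school = False
--
--     school_keywords = {
--         'arts': 'School of Arts & Sciences',
--         'sciences': 'School of Arts & Sciences',
--         'business': 'School of Business & Governance',
--         'governance': 'School of Business & Governance',
--         'education': 'School of Education',
--         'engineering': 'School of Engineering & Architecture',
--         'architecture': 'School of Engineering & Architecture',
--         'nursing': 'School of Nursing'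
--     }
--
--     target_school = None
--     for keyword, school_name in school_keywords.items():
--         if keyword in query:
--             target_school = school_name
--             break
--
--     for line in lines:
--         line = line.strip()
--         if line.startswith('School of'):
--             if target_school and target_school in line:
--                 in_target_school = True
--                 result.append(line)
--             else:
--                 in_target_school = False
--         elif in_target_school and line:
--             result.append(line)
--
--     return '\n'.join(result) if result else f"I couldn't find information about that school."
-- ===== SOURCE B (Python) =====
-- def _extract_school_info(content: str, query: str) -> str:
--     """Extract school-specific information (section-partition re-implementation)."""
--     school_keywords = {
--         'arts': 'School of Arts & Sciences',
--         'sciences': 'School of Arts & Sciences',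
--         'business': 'School of Business & Governance',
--         'governance': 'School of Business & Governance',
--         'education': 'School of Education',
--         'engineering': 'School of Engineering & Architecture',
--         'architecture': 'School of Engineering & Architecture',
--         'nursing': 'School of Nursing'
--     }
--     target_school = next((s for k, s in school_keywords.items() if k in query), None)
--
--     lines = content.split('\n')
--     n = len(lines)
--
--     def take_body(i):
--         body = []
--         while i < n:
--             l = lines[i].strip()
--             if l.startswith('School of'):
--                 break
--             if l:
--                 body.append(l)
--             i += 1
--         return body, i
--
--     sections = []
--     i = 0
--     while i < n:
--         h = lines[i].strip()
--         i += 1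
--         if h.startswith('School of'):
--             body, i = take_body(i)
--             sections.append((h, body))
--
--     result = []
--     for h, body in sections:
--         if target_school is not None and target_school in h:
--             result.append(h)
--             result.extend(body)
--
--     return '\n'.join(result) if result else "I couldn't find information about that school."
-- ===== Notes on version B (the rewrite author's own statement) =====
-- stated objective: alternative
-- what changed: A's single flag-carrying scan is re-decomposed into an explicit section partition (collect (heading, body) pairs up to the next heading), followed by filtering the sections whose heading contains the target school and flattening them; the first-match keyword lookup becomes a find-first over the same dict items.
import Mathlib
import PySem

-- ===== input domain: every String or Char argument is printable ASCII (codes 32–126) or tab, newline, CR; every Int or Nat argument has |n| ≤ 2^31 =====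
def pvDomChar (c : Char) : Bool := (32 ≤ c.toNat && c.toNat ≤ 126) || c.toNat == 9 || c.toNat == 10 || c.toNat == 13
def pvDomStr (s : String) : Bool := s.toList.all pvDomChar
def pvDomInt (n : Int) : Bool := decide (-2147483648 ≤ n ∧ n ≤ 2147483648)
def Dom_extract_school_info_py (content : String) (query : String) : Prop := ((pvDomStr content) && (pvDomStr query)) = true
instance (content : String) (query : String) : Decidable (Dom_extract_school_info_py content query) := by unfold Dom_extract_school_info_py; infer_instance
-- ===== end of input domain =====

-- B re-decomposes A's single flag-carrying scan into "partition into (heading, body) sections,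
-- then filter matching sections and flatten"; objective: alternative (same cost, clearer structure).

-- ===== PORT A =====
-- the keyword → school dict (identical literal in both Pythons)
def schoolKeywords : List (String × String) :=
  [("arts", "School of Arts & Sciences"),
   ("sciences", "School of Arts & Sciences"),
   ("business", "School of Business & Governance"),
   ("governance", "School of Business & Governance"),
   ("education", "School of Education"),
   ("engineering", "School of Engineering & Architecture"),
   ("architecture", "School of Engineering & Architecture"),
   ("nursing", "School of Nursing")]

-- A's 'for keyword, school_name in …: if keyword in query: …; break'
def findTargetA : List (String × String) → String → Option String
  | [], _ => none
  | (k, s) :: rest, q => if PySem.Str.isIn k q then some s else findTargetA rest q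

-- Python's 'target_school and target_school in line' (target_school is a non-empty string or None)
def targetHitA (target : Option String) (l : String) : Bool :=
  match target with
  | some t => PySem.Str.isIn t l
  | none => false

-- A's loop body over state (result, in_target_school)
def aStep (target : Option String) (st : List String × Bool) (line : String) :
    List String × Bool :=
  let l := PySem.Str.strip line
  if PySem.Str.startswith l "School of" then
    if targetHitA target l then (st.1 ++ [l], true) else (st.1, false)
  else if st.2 && !(l == "") then (st.1 ++ [l], st.2) else st

def extract_school_info_py (content : String) (query : String) : String :=
  let lines := (PySem.Str.split? content "\n").getD []   -- sep "\n" ≠ "", so split? is always some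
  let target := findTargetA schoolKeywords query
  let result := (lines.foldl (aStep target) ([], false)).1
  if result.isEmpty then "I couldn't find information about that school."
  else PySem.Str.join "\n" result

-- ===== PORT B =====
-- Source B's take_body: stripped nonempty lines up to the next heading, plus the remaining lines
def takeBodyB : List String → List String × List String
  | [] => ([], [])
  | x :: r =>
    let l := PySem.Str.strip x
    if PySem.Str.startswith l "School of" then ([], x :: r)
    else
      let p := takeBodyB r
      ((if l == "" then p.1 else l :: p.1), p.2)

theorem takeBodyB_snd_le : ∀ xs : List String, (takeBodyB xs).2.length ≤ xs.length := by
  intro xs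
  induction xs with
  | nil => simp [takeBodyB]
  | cons x r ih =>
    simp only [takeBodyB]
    split
    · simp
    · simpa using Nat.le_succ_of_le ih

-- Source B's sections loop: (heading, body) pairs in order
def secsB : List String → List (String × List String)
  | [] => []
  | x :: r =>
    let l := PySem.Str.strip x
    if PySem.Str.startswith l "School of" then
      (l, (takeBodyB r).1) :: secsB (takeBodyB r).2
    else secsB r
termination_by xs => xs.length
decreasing_by
  · exact Nat.lt_succ_of_le (takeBodyB_snd_le r)
  · simp

-- 'target_school is not None and target_school in h'
def hitB (target : Option String) (h : String) : Bool :=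
  match target with
  | some t => PySem.Str.isIn t h
  | none => false

def extract_school_info_py_alt (content : String) (query : String) : String :=
  let lines := (PySem.Str.split? content "\n").getD []   -- sep "\n" ≠ "", so split? is always some
  let target := (schoolKeywords.find? (fun kv => PySem.Str.isIn kv.1 query)).map (·.2)
  let result := ((secsB lines).filter (fun s => hitB target s.1)).flatMap
    (fun s => s.1 :: s.2)
  if result.isEmpty then "I couldn't find information about that school."
  else PySem.Str.join "\n" result

-- ===== PRECONDITION & SPEC =====
def Spec_extract_school_info_py (content : String) (query : String) (out : String) : Prop := out = extract_school_info_py_alt content query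
instance (content : String) (query : String) (out : String) : Decidable (Spec_extract_school_info_py content query out) := by unfold Spec_extract_school_info_py; infer_instance

-- ===== CLAIM (what is proved, stated in full; the proofs are below) =====
def Claim_equal_extract_school_info_py : Prop := ∀ (content : String) (query : String), Dom_extract_school_info_py content query → Spec_extract_school_info_py content query (extract_school_info_py content query)

-- ===== LEMMAS AND PROOFS =====

theorem hitB_eq_targetHitA (target : Option String) (l : String) :
    hitB target l = targetHitA target l := by
  cases target <;> rfl

-- the two target lookups agree
theorem findTargetA_eq_find? (q : String) : ∀ l : List (String × String),
    findTargetA l q = (l.find? (fun kv => PySem.Str.isIn kv.1 q)).map (·.2) := by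
  intro l
  induction l with
  | nil => rfl
  | cons kv rest ih =>
    obtain ⟨k, s⟩ := kv
    rw [findTargetA, List.find?]
    by_cases h : PySem.Str.isIn k q = true
    · rw [if_pos h, h]
      rfl
    · rw [if_neg h, Bool.of_not_eq_true h, ih]

-- recursive characterisation of A's loop (flag as explicit argument)
def gA (target : Option String) : Bool → List String → List String
  | _, [] => []
  | flag, x :: r =>
    let l := PySem.Str.strip x
    if PySem.Str.startswith l "School of" then
      if targetHitA target l then l :: gA target true r else gA target false r
    else if flag && !(l == "") then l :: gA target flag r else gA target flag r

theorem foldl_aStep_eq (target : Option String) :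
    ∀ (lines : List String) (acc : List String) (flag : Bool),
      (lines.foldl (aStep target) (acc, flag)).1 = acc ++ gA target flag lines := by
  intro lines
  induction lines with
  | nil => intro acc flag; simp [gA]
  | cons x r ih =>
    intro acc flag
    rw [List.foldl_cons, gA]
    simp only [aStep]
    split_ifs with hh ht hf <;> rw [ih] <;> try simp

-- with the flag on, A collects exactly the body up to the next heading, then continues flag-off
theorem gA_true_eq (target : Option String) : ∀ xs : List String,
    gA target true xs = (takeBodyB xs).1 ++ gA target false (takeBodyB xs).2 := by
  intro xs
  induction xs with
  | nil => simp [gA, takeBodyB]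
  | cons x r ih =>
    rw [gA, takeBodyB]
    simp only [Bool.true_and]
    by_cases hh : PySem.Str.startswith (PySem.Str.strip x) "School of" = true
    · rw [if_pos hh, if_pos hh]
      simp only [List.nil_append]
      rw [gA, if_pos hh]
    · rw [if_neg hh, if_neg hh]
      by_cases he : (PySem.Str.strip x == "") = true
      · rw [he, ih]
        simp
      · rw [Bool.of_not_eq_true he, ih]
        simp

-- secsB ignores the non-heading lines takeBodyB consumes
theorem secsB_takeBodyB : ∀ xs : List String, secsB xs = secsB (takeBodyB xs).2 := by
  intro xs
  induction xs with
  | nil => rfl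
  | cons x r ih =>
    rw [takeBodyB]
    by_cases hh : PySem.Str.startswith (PySem.Str.strip x) "School of" = true
    · rw [if_pos hh]
    · rw [if_neg hh, secsB, if_neg hh]
      exact ih

-- main bridge: A's flag-off scan = filter-and-flatten of B's sections
theorem gA_false_eq (target : Option String) : ∀ xs : List String,
    gA target false xs =
      ((secsB xs).filter (fun s => hitB target s.1)).flatMap (fun s => s.1 :: s.2) := by
  intro xs
  induction hn : xs.length using Nat.strong_induction_on generalizing xs with
  | _ n ih =>
    cases xs with
    | nil => simp [gA, secsB]
    | cons x r =>
      subst hn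
      rw [gA]
      by_cases hh : PySem.Str.startswith (PySem.Str.strip x) "School of" = true
      · rw [if_pos hh, secsB, if_pos hh, List.filter_cons]
        simp only [hitB_eq_targetHitA]
        by_cases ht : targetHitA target (PySem.Str.strip x) = true
        · rw [if_pos ht, if_pos ht, gA_true_eq, List.flatMap_cons,
            ih (takeBodyB r).2.length (Nat.lt_succ_of_le (takeBodyB_snd_le r)) _ rfl]
          simp [hitB_eq_targetHitA]
        · rw [if_neg ht, if_neg ht,
            ih r.length (Nat.lt_succ_self _) r rfl, secsB_takeBodyB r]
          simp [hitB_eq_targetHitA]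
      · rw [if_neg hh]
        simp only [Bool.false_and, Bool.false_eq_true, if_false]
        rw [ih r.length (Nat.lt_succ_self _) r rfl, secsB, if_neg hh]

-- ===== VERDICT (by name: the statement is the Claim_ definition above) =====
theorem extract_school_info_py_spec : Claim_equal_extract_school_info_py := by
  unfold Claim_equal_extract_school_info_py
  intro content query _
  unfold Spec_extract_school_info_py extract_school_info_py extract_school_info_py_alt
  simp only [foldl_aStep_eq, gA_false_eq, findTargetA_eq_find?, List.nil_append]
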